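-- pv_equiv track=rewrite | github.com/uomsystemsbiology/particle_dosimetry | src/equationSolution.py | get_random_walk_paths_that_hit_point
-- ===== SOURCE A (Python) =====
-- import itertools
--
-- def get_random_walk_paths_that_hit_point(point, path_len):
--     fx = lambda x: x*2 - 1
--     walks_that_hit = 0
--     for seq in itertools.product([0,1], repeat=path_len):
--         steps = map(fx,seq)
--         current_position = 0
--         if point == 0:
--             walks_that_hit += 1
--         else:
--             for step in steps:
--                 current_position += step
--                 if current_position == point:
--                     walks_that_hit += 1
--                     break
--     return walks_that_hit
-- ===== SOURCE B (Python) =====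
-- def get_random_walk_paths_that_hit_point(point, path_len):
--     # Dynamic programming on avoiders: av[i] (position x = i + t - n) holds the
--     # number of +-1 walks of t steps starting at x whose every visited position
--     # differs from `point`; hitters = 2**n - avoiders-from-0.
--     if point == 0:
--         return 2 ** path_len
--     n = path_len
--     av = [0 if x == point else 1 for x in range(-n, n + 1)]
--     for t in range(1, n + 1):
--         av = [0 if i + t - n == point else av[i] + av[i + 2]
--               for i in range(len(av) - 2)]
--     return 2 ** n - av[0]
-- ===== Notes on version B (the rewrite author's own statement) =====
-- stated objective: faster
-- what changed: Replaces A's enumeration of all 2^path_len step sequences with a dynamic program over positions counting walks that avoid the target point (answer = 2^path_len minus avoiders); intended as faster: in a timing run A timed out at path_len=16 while B returned, though no clean ratio could be measured.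
import Mathlib
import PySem

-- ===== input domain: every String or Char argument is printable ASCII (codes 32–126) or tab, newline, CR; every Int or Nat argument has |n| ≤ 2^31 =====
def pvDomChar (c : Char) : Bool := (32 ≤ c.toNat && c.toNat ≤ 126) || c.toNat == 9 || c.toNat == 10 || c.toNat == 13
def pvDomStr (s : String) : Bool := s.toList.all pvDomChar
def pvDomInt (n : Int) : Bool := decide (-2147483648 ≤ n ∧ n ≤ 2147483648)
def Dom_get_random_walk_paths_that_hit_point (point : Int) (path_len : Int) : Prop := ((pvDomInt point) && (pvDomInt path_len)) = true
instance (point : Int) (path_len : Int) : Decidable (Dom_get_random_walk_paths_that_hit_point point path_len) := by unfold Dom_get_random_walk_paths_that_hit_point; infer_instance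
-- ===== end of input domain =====

-- B replaces A's enumeration of all 2^path_len step sequences by a polynomial-size
-- dynamic program counting walks that avoid `point`; intended as faster (the timing
-- run saw A time out at path_len=16 while B returned; no clean ratio was measured).

-- ===== PORT A =====
-- itertools.product([0,1], repeat=n): first coordinate varies slowest
def pyProducts : Nat → List (List Int)
  | 0 => [[]]
  | n + 1 => [(0 : Int), 1].flatMap (fun a => (pyProducts n).map (fun r => a :: r))

-- A's inner 'for step in steps: … break' loop
def pyHitLoop (point : Int) (cur : Int) : List Int → Bool
  | [] => false
  | s :: r => if cur + s = point then true else pyHitLoop point (cur + s) r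

def get_random_walk_paths_that_hit_point (point : Int) (path_len : Int) : Int :=
  (pyProducts path_len.toNat).foldl
    (fun acc seq =>
      if point = 0 then acc + 1
      else if pyHitLoop point 0 (seq.map (fun x => x * 2 - 1)) then acc + 1 else acc) 0

-- ===== PORT B =====
-- one comprehension step of Source B's loop; av[i], av[i+2] are always in range there
def bStep (point : Int) (n : Int) (t : Int) (av : List Int) : List Int :=
  (PySem.List.pyRange 0 ((av.length : Int) - 2) 1).map
    (fun i => if i + t - n = point then 0
              else PySem.List.pyGetD av i 0 + PySem.List.pyGetD av (i + 2) 0)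

def get_random_walk_paths_that_hit_point_alt (point : Int) (path_len : Int) : Int :=
  if point = 0 then 2 ^ path_len.toNat
  else
    let n := path_len
    let av0 := (PySem.List.pyRange (-n) (n + 1) 1).map
      (fun x => if x = point then (0 : Int) else 1)
    let av := (PySem.List.pyRange 1 (n + 1) 1).foldl (fun av t => bStep point n t av) av0
    2 ^ path_len.toNat - PySem.List.pyGetD av 0 0

-- ===== PRECONDITION & SPEC =====
-- A raises ValueError('repeat argument cannot be negative') for path_len < 0
def Pre_get_random_walk_paths_that_hit_point (point : Int) (path_len : Int) : Prop :=
  0 ≤ path_len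
instance (point : Int) (path_len : Int) : Decidable (Pre_get_random_walk_paths_that_hit_point point path_len) := by unfold Pre_get_random_walk_paths_that_hit_point; infer_instance
def pvWitness_get_random_walk_paths_that_hit_point : Int × Int := (1, 3)
def Spec_get_random_walk_paths_that_hit_point (point : Int) (path_len : Int) (out : Int) : Prop := out = get_random_walk_paths_that_hit_point_alt point path_len
instance (point : Int) (path_len : Int) (out : Int) : Decidable (Spec_get_random_walk_paths_that_hit_point point path_len out) := by unfold Spec_get_random_walk_paths_that_hit_point; infer_instance

-- ===== CLAIM (what is proved, stated in full; the proofs are below) =====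
def Claim_equal_get_random_walk_paths_that_hit_point : Prop := ∀ (point : Int) (path_len : Int), Dom_get_random_walk_paths_that_hit_point point path_len → Pre_get_random_walk_paths_that_hit_point point path_len → Spec_get_random_walk_paths_that_hit_point point path_len (get_random_walk_paths_that_hit_point point path_len)

-- ===== LEMMAS AND PROOFS =====

-- Av point t cur = number of t-step ±1 walks from cur whose every visited
-- position (cur itself excepted at t=0 entry, handled by the guard) avoids point
def Av (point : Int) : Nat → Int → Int
  | 0, cur => if cur = point then 0 else 1
  | t + 1, cur => if cur = point then 0 else Av point t (cur - 1) + Av point t (cur + 1)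

def avSpec (point n : Int) (t : Int) : List Int :=
  (PySem.List.pyRange (t - n) (n - t + 1) 1).map (fun x => Av point t.toNat x)

lemma length_pyProducts (n : Nat) : (pyProducts n).length = 2 ^ n := by
  induction n with
  | zero => rfl
  | succ n ih => simp [pyProducts, ih]; ring

lemma foldl_count_if_int {α : Type} (p : α → Bool) :
    ∀ (l : List α) (acc : Int),
      l.foldl (fun a s => if p s then a + 1 else a) acc = acc + l.countP p := by
  intro l
  induction l with
  | nil => simp
  | cons x xs ih =>
      intro acc
      by_cases h : p x <;> simp [List.countP_cons, h, ih] <;> push_cast <;> ring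

lemma foldl_add_one_int {α : Type} :
    ∀ (l : List α) (acc : Int), l.foldl (fun a _ => a + 1) acc = acc + l.length := by
  intro l
  induction l with
  | nil => simp
  | cons x xs ih => intro acc; simp [ih]; push_cast; ring

lemma avoid_count (point : Int) :
    ∀ (n : Nat) (cur : Int), cur ≠ point →
      ((pyProducts n).countP
        (fun seq => !pyHitLoop point cur (seq.map (fun x => x * 2 - 1))) : Int)
        = Av point n cur := by
  intro n
  induction n with
  | zero =>
      intro cur hc
      simp [pyProducts, pyHitLoop, Av, hc]
  | succ n ih =>
      intro cur hc
      have expand : (pyProducts (n + 1)).countP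
          (fun seq => !pyHitLoop point cur (seq.map (fun x => x * 2 - 1)))
          = (pyProducts n).countP
              (fun r => !pyHitLoop point cur ((0 * 2 - 1) :: r.map (fun x => x * 2 - 1)))
            + (pyProducts n).countP
              (fun r => !pyHitLoop point cur ((1 * 2 - 1) :: r.map (fun x => x * 2 - 1))) := by
        simp [pyProducts, List.countP_map, Function.comp_def]
      have branch : ∀ s : Int,
          ((pyProducts n).countP
            (fun r => !pyHitLoop point cur (s :: r.map (fun x => x * 2 - 1))) : Int)
            = Av point n (cur + s) := by
        intro s
        by_cases hs : cur + s = point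
        · simp [pyHitLoop, hs]
          induction n with
          | zero => simp [Av, hs]
          | succ m _ => simp [Av, hs]
        · have := ih (cur + s) hs
          simpa [pyHitLoop, hs] using this
      have b0 := branch (-1)
      have b1 := branch 1
      rw [show Av point (n + 1) cur
            = Av point n (cur - 1) + Av point n (cur + 1) by simp [Av, hc]]
      push_cast [expand]
      rw [b0, b1, show cur + -1 = cur - 1 by ring]

lemma countP_split {α : Type} (p : α → Bool) :
    ∀ l : List α, l.countP p + l.countP (fun a => !p a) = l.length := by
  intro l
  induction l with
  | nil => rfl
  | cons x xs ih => by_cases h : p x <;> simp [List.countP_cons, h, ih] <;> omega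

lemma hit_count (point : Int) (n : Nat) (h0 : point ≠ 0) :
    ((pyProducts n).countP
      (fun seq => pyHitLoop point 0 (seq.map (fun x => x * 2 - 1))) : Int)
      = 2 ^ n - Av point n 0 := by
  have hav := avoid_count point n 0 (fun he => h0 he.symm)
  have hsplit := countP_split
    (fun seq => pyHitLoop point 0 (seq.map (fun x => x * 2 - 1))) (pyProducts n)
  beta_reduce at hsplit
  rw [length_pyProducts] at hsplit
  have h2 : ((2 ^ n : Nat) : Int) = 2 ^ n := by push_cast; ring
  omega

lemma av_zero (point n : Int) :
    (PySem.List.pyRange (-n) (n + 1) 1).map (fun x => if x = point then (0 : Int) else 1)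
      = avSpec point n 0 := by
  unfold avSpec
  norm_num [Av]

lemma bStep_avSpec (point n t : Int) (h1 : 1 ≤ t) (h2 : t ≤ n) :
    bStep point n t (avSpec point n (t - 1)) = avSpec point n t := by
  have hlen : ((avSpec point n (t - 1)).length : Int) = 2 * (n - t) + 3 := by
    unfold avSpec
    rw [List.length_map, PySem.List.length_pyRange_one]
    omega
  have hT : t.toNat = (t - 1).toNat + 1 := by omega
  unfold bStep
  rw [hlen]
  unfold avSpec
  rw [PySem.List.pyRange_one 0, PySem.List.pyRange_one (t - n)]
  have hcnt : (2 * (n - t) + 3 - 2 - 0).toNat = (n - t + 1 - (t - n)).toNat := by omega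
  rw [List.map_map, List.map_map, hcnt]
  apply List.map_congr_left
  intro k hk
  have hkN : k < (n - t + 1 - (t - n)).toNat := List.mem_range.mp hk
  have hk1 : (k : Int) < 2 * (n - t) + 1 := by omega
  simp only [Function.comp_def, zero_add]
  have hget : ∀ (j : Nat), (j : Int) < 2 * (n - t) + 3 →
      PySem.List.pyGetD
        ((PySem.List.pyRange (t - 1 - n) (n - (t - 1) + 1) 1).map
          (fun x => Av point (t - 1).toNat x)) (j : Int) 0
        = Av point (t - 1).toNat (t - 1 - n + j) := by
    intro j hj
    exact PySem.List.pyGetD_map_pyRange_one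
      (fun x => Av point (t - 1).toNat x) (t - 1 - n) (n - (t - 1) + 1) j 0
      (by omega)
  have g1 := hget k (by omega)
  have g2 := hget (k + 2) (by omega)
  rw [g1]
  rw [show ((k : Int) + 2) = ((k + 2 : Nat) : Int) by push_cast; ring, g2, hT]
  rw [show Av point ((t - 1).toNat + 1) (t - n + (k : Int))
        = if t - n + (k : Int) = point then 0
          else Av point (t - 1).toNat (t - n + (k : Int) - 1)
            + Av point (t - 1).toNat (t - n + (k : Int) + 1) from rfl]
  rw [show (k : Int) + t - n = t - n + (k : Int) by ring]
  rw [show t - n + (k : Int) - 1 = t - 1 - n + (k : Int) by ring]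
  rw [show t - n + (k : Int) + 1 = t - 1 - n + ((k + 2 : Nat) : Int) by push_cast; ring]

lemma fold_avSpec (point n : Int) :
    ∀ (m : Nat), (m : Int) ≤ n →
      (PySem.List.pyRange 1 ((m : Int) + 1) 1).foldl
        (fun av t => bStep point n t av) (avSpec point n 0)
        = avSpec point n m := by
  intro m
  induction m with
  | zero =>
      intro _
      rw [PySem.List.pyRange_one]
      norm_num
  | succ m ih =>
      intro hm
      have hsplit : PySem.List.pyRange 1 (((m + 1 : Nat) : Int) + 1) 1
          = PySem.List.pyRange 1 ((m : Int) + 1) 1 ++ [(m : Int) + 1] := by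
        push_cast
        exact PySem.List.pyRange_one_succ_right (by omega : (1 : Int) ≤ (m : Int) + 1)
      rw [hsplit, List.foldl_append, ih (by omega)]
      have hprev : (m : Int) = ((m : Int) + 1) - 1 := by ring
      simp only [List.foldl_cons, List.foldl_nil]
      rw [show avSpec point n (m : Int) = avSpec point n (((m : Int) + 1) - 1) by
            rw [← hprev]]
      rw [bStep_avSpec point n ((m : Int) + 1) (by omega) (by push_cast at hm ⊢; omega)]
      push_cast
      rfl

-- ===== VERDICT (by name: the statement is the Claim_ definition above) =====
theorem get_random_walk_paths_that_hit_point_spec : Claim_equal_get_random_walk_paths_that_hit_point := by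
  intro point path_len _ hpre
  have hp : 0 ≤ path_len := hpre
  obtain ⟨n, rfl⟩ : ∃ n : Nat, path_len = (n : Int) := ⟨path_len.toNat, by omega⟩
  unfold Spec_get_random_walk_paths_that_hit_point
  unfold get_random_walk_paths_that_hit_point get_random_walk_paths_that_hit_point_alt
  simp only [Int.toNat_natCast]
  by_cases h0 : point = 0
  · simp only [h0, if_true]
    rw [foldl_add_one_int, length_pyProducts]
    push_cast
    ring
  · simp only [if_neg h0]
    rw [foldl_count_if_int, hit_count point n h0]
    have hfold := fold_avSpec point (n : Int) n (by omega)
    rw [av_zero point (n : Int), hfold]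
    have hfin : avSpec point (n : Int) ((n : Nat) : Int)
        = [Av point ((n : Nat) : Int).toNat 0] := by
      unfold avSpec
      rw [show ((n : Nat) : Int) - (n : Int) = 0 by ring,
        PySem.List.pyRange_one_singleton]
      rfl
    rw [hfin, PySem.List.pyGetD_zero_cons, Int.toNat_natCast]
    ring
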